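-- pv_equiv track=rewrite | github.com/kishnakushwaha/content-refactor-engine | backend/services/retrieval_engine.py | rank_urls
-- ===== SOURCE A (Python) =====
-- def rank_urls(urls, article_text):
--     """Rank URLs based on domain quality + keyword overlap."""
--     keywords = set(article_text.lower().split()[:50])
--     ranked = []
--
--     for url in urls:
--         score = 0
--         url_lower = url.lower()
--         for k in keywords:
--             if k in url_lower:
--                 score += 1
--         if any(x in url_lower for x in ["blog", "article", "post"]):
--             score += 3
--         ranked.append((url, score))
--
--     ranked.sort(key=lambda x: x[1], reverse=True)
--     return [u[0] for u in ranked]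
-- ===== SOURCE B (Python) =====
-- def _score(keywords, url):
--     ul = url.lower()
--     s = sum(1 for k in keywords if k in ul)
--     if any(w in ul for w in ("blog", "article", "post")):
--         s += 3
--     return s
--
--
-- def rank_urls(urls, article_text):
--     """Rank URLs based on domain quality + keyword overlap."""
--     keywords = set(article_text.lower().split()[:50])
--     scored = [(u, _score(keywords, u)) for u in urls]
--     # stable counting sort: scores are bounded by 50 keywords + 3 bonus
--     buckets = [[] for _ in range(54)]
--     for u, s in scored:
--         buckets[s].append(u)
--     out = []
--     for b in reversed(buckets):
--         out += b
--     return out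
-- ===== Notes on version B (the rewrite author's own statement) =====
-- stated objective: alternative
-- what changed: B replaces A's stable reverse comparison sort of the (url, score) pairs by a stable counting/bucket sort over the bounded score range 0..53, appending urls to score buckets in input order and emitting buckets from highest score down.
import Mathlib
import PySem

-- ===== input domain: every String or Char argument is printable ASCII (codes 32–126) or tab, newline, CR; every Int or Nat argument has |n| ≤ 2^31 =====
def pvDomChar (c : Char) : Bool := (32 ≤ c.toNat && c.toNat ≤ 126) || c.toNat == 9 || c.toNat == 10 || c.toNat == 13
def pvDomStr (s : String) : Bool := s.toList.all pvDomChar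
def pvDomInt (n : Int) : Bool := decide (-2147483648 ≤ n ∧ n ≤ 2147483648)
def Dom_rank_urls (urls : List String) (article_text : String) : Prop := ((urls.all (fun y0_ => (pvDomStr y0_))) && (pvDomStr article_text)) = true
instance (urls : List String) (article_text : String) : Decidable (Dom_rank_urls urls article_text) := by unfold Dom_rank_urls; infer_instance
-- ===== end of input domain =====

-- B replaces the stable reverse `sort` of A by a stable counting sort over the
-- bounded score range 0..53 (50 keywords + 3 bonus): alternative algorithm, same result.

-- ===== PORT A =====
def rank_urls (urls : List String) (article_text : String) : List String :=
  let keywords : PySem.Set String :=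
    PySem.Set.ofList (PySem.List.slice (PySem.Str.split₀ (PySem.Str.lower article_text)) none (some 50))
  let ranked : List (String × Int) :=
    urls.foldl (fun acc url =>
      let url_lower := PySem.Str.lower url
      let score : Int := keywords.foldl (fun s k => if PySem.Str.isIn k url_lower then s + 1 else s) 0
      let score : Int :=
        if (["blog", "article", "post"]).any (fun x => PySem.Str.isIn x url_lower) then score + 3 else score
      acc ++ [(url, score)]) []
  (PySem.List.sorted ranked (fun x => x.2) true).map (fun u => u.1)

-- ===== PORT B =====
def pvScoreB (keywords : PySem.Set String) (url : String) : Int :=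
  let ul := PySem.Str.lower url
  let s : Int := ((keywords.filter (fun k => PySem.Str.isIn k ul)).map (fun _ => (1 : Int))).sum
  if (["blog", "article", "post"]).any (fun w => PySem.Str.isIn w ul) then s + 3 else s

def rank_urls_alt (urls : List String) (article_text : String) : List String :=
  let keywords : PySem.Set String :=
    PySem.Set.ofList (PySem.List.slice (PySem.Str.split₀ (PySem.Str.lower article_text)) none (some 50))
  let scored : List (String × Int) := urls.map (fun u => (u, pvScoreB keywords u))
  -- buckets[s].append(u): scores are provably in 0..53, so .toNat is exact here
  let buckets : List (List String) :=
    scored.foldl (fun bs p => bs.set p.2.toNat ((bs.getD p.2.toNat []) ++ [p.1]))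
      (List.replicate 54 ([] : List String))
  buckets.reverse.foldl (fun out b => out ++ b) []

-- ===== PRECONDITION & SPEC =====
def Spec_rank_urls (urls : List String) (article_text : String) (out : List String) : Prop := out = rank_urls_alt urls article_text
instance (urls : List String) (article_text : String) (out : List String) : Decidable (Spec_rank_urls urls article_text out) := by unfold Spec_rank_urls; infer_instance

-- ===== CLAIM (what is proved, stated in full; the proofs are below) =====
def Claim_equal_rank_urls : Prop := ∀ (urls : List String) (article_text : String), Dom_rank_urls urls article_text → Spec_rank_urls urls article_text (rank_urls urls article_text)

-- ===== LEMMAS AND PROOFS =====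

-- inserting x into as ++ bs lands exactly between them when x goes after all of as and before all of bs
theorem pv_insertBy_middle {α : Type} (before : α → α → Bool) (x : α) (as bs : List α)
    (h1 : ∀ y ∈ as, before x y = false) (h2 : ∀ y ∈ bs, before x y = true) :
    PySem.List.insertBy before x (as ++ bs) = as ++ x :: bs := by
  induction as with
  | nil =>
      cases bs with
      | nil => simp [PySem.List.insertBy]
      | cons b bs' => simp [PySem.List.insertBy, h2 b (by simp)]
  | cons a as' ih =>
      simp only [List.cons_append, PySem.List.insertBy, h1 a (by simp)]
      simp only [Bool.false_eq_true, if_false, List.cons.injEq, true_and]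
      exact ih (fun y hy => h1 y (by simp [hy]))

-- insertBy skips a prefix none of whose elements x precedes
theorem pv_insertBy_skip {α : Type} (before : α → α → Bool) (x : α) (as bs : List α)
    (h1 : ∀ y ∈ as, before x y = false) :
    PySem.List.insertBy before x (as ++ bs) = as ++ PySem.List.insertBy before x bs := by
  induction as with
  | nil => simp
  | cons a as' ih =>
      simp only [List.cons_append, PySem.List.insertBy, h1 a (by simp)]
      simp only [Bool.false_eq_true, if_false, List.cons.injEq, true_and]
      exact ih (fun y hy => h1 y (by simp [hy]))

-- inserting one scored pair into a descending bucket concatenation appends it to its bucket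
theorem pv_insertBy_flatMap (L : List Nat) (f : Nat → List (String × Int))
    (hf : ∀ s, ∀ p ∈ f s, p.2 = (s : Int))
    (hL : L.Pairwise (· > ·)) (x : String × Int) (k : Nat) (hx : x.2 = (k : Int)) (hk : k ∈ L) :
    PySem.List.insertBy (fun a b => decide (b.2 < a.2)) x (L.flatMap f)
      = L.flatMap (fun s => f s ++ if k = s then [x] else []) := by
  induction L with
  | nil => cases hk
  | cons s L' ih =>
      rcases List.pairwise_cons.mp hL with ⟨hs, hL'⟩
      simp only [List.flatMap_cons]
      by_cases hks : k = s
      · subst hks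
        have hnot : k ∉ L' := fun h => lt_irrefl k (hs k h)
        rw [pv_insertBy_middle _ x (f k) (L'.flatMap f)
            (fun y hy => by simp [hf k y hy, hx])
            (fun y hy => by
              rcases List.mem_flatMap.mp hy with ⟨t, ht, hyt⟩
              simp [hf t y hyt, hx]
              exact_mod_cast hs t ht)]
        have : L'.flatMap (fun s => f s ++ if k = s then [x] else []) = L'.flatMap f := by
          apply List.flatMap_congr  -- congruence over members
          intro t ht
          have : k ≠ t := fun h => (hnot (h ▸ ht))
          simp [this]
        rw [this]; simp
      · have hk' : k ∈ L' := by
          rcases List.mem_cons.mp hk with h | h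
          · exact absurd h hks
          · exact h
        have hsk : k < s := hs k hk'
        rw [pv_insertBy_skip _ x (f s) _ (fun y hy => by
              have hy2 : y.2 = (s : Int) := hf s y hy
              have : ¬ (y.2 < x.2) := by rw [hy2, hx]; exact_mod_cast not_lt.mpr (le_of_lt hsk)
              simp [this]),
            ih hL' hk']
        simp [hks]

-- A's stable reverse sort of bounded scores IS the descending bucket concatenation
theorem pv_sorted_eq_buckets (ps : List (String × Int))
    (hb : ∀ p ∈ ps, 0 ≤ p.2 ∧ p.2 < 54) :
    PySem.List.sorted ps (fun x => x.2) true
      = ((List.range 54).reverse).flatMap (fun (s : Nat) => ps.filter (fun p => p.2 = (s : Int))) := by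
  rw [PySem.List.sorted_rev_eq_foldl_insertBy]
  induction ps using List.reverseRecOn with
  | nil => simp
  | append_singleton qs x ih =>
      have hbq : ∀ p ∈ qs, 0 ≤ p.2 ∧ p.2 < 54 := fun p hp => hb p (by simp [hp])
      rcases hb x (by simp) with ⟨hx0, hx54⟩
      rw [List.foldl_append, List.foldl_cons, List.foldl_nil, ih hbq]
      have hx : x.2 = (x.2.toNat : Int) := (Int.toNat_of_nonneg hx0).symm
      have hkmem : x.2.toNat ∈ (List.range 54).reverse := by
        simp [List.mem_range]; omega
      rw [pv_insertBy_flatMap _ _ (fun s p hp => by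
            have := List.of_mem_filter hp; exact of_decide_eq_true this)
          (by rw [List.pairwise_reverse]; simpa using List.pairwise_lt_range) x x.2.toNat hx hkmem]
      apply List.flatMap_congr
      intro s hs
      rw [List.filter_append]
      congr 1
      by_cases h : x.2.toNat = s
      · simp [List.filter, show x.2 = (s : Int) from h ▸ hx]
      · have : ¬ (x.2 = (s : Int)) := by omega
        simp [h, List.filter, this]

-- B's bucket-building fold, characterised
theorem pv_buckets_char (ps : List (String × Int))
    (hb : ∀ p ∈ ps, 0 ≤ p.2 ∧ p.2 < 54) :
    ps.foldl (fun bs p => bs.set p.2.toNat ((bs.getD p.2.toNat []) ++ [p.1]))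
        (List.replicate 54 ([] : List String))
      = (List.range 54).map (fun (s : Nat) => (ps.filter (fun p => p.2 = (s : Int))).map Prod.fst) := by
  induction ps using List.reverseRecOn with
  | nil =>
      apply List.ext_getElem <;> simp
  | append_singleton qs x ih =>
      have hbq : ∀ p ∈ qs, 0 ≤ p.2 ∧ p.2 < 54 := fun p hp => hb p (by simp [hp])
      rcases hb x (by simp) with ⟨hx0, hx54⟩
      have hk : x.2.toNat < 54 := by omega
      rw [List.foldl_append, List.foldl_cons, List.foldl_nil, ih hbq]
      rw [PySem.List.getD_map_range _ _ _ _ hk]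
      apply List.ext_getElem
      · simp
      · intro i h1 h2
        simp only [List.getElem_set, List.getElem_map, List.getElem_range]
        by_cases hik : x.2.toNat = i
        · subst hik
          rw [if_pos rfl, List.filter_append, List.map_append]
          have hxi : x.2 = (x.2.toNat : Int) := (Int.toNat_of_nonneg hx0).symm
          simp [List.filter, ← hxi]
        · rw [if_neg hik, List.filter_append]
          have : ¬ (x.2 = (i : Int)) := by omega
          simp [List.filter, this]

-- the two scoring expressions agree
theorem pv_score_eq (keywords : PySem.Set String) (url : String) :
    (let url_lower := PySem.Str.lower url
     let score : Int := keywords.foldl (fun s k => if PySem.Str.isIn k url_lower then s + 1 else s) 0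
     if (["blog", "article", "post"]).any (fun x => PySem.Str.isIn x url_lower) then score + 3 else score)
    = pvScoreB keywords url := by
  simp only [pvScoreB]
  rw [PySem.List.foldl_if_add_one]
  congr 1 <;>
  · rw [PySem.List.sum_map_const_int, ← List.countP_eq_length_filter]
    simp

theorem pv_flatMap_map_fst (L : List Nat) (ps : List (String × Int)) :
    (L.flatMap (fun (s : Nat) => ps.filter (fun p => p.2 = (s : Int)))).map Prod.fst
      = L.flatMap (fun (s : Nat) => (ps.filter (fun p => p.2 = (s : Int))).map Prod.fst) := by
  simp [List.map_flatMap]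

theorem pv_score_bounds (keywords : PySem.Set String) (hlen : keywords.length ≤ 50) (url : String) :
    0 ≤ pvScoreB keywords url ∧ pvScoreB keywords url < 54 := by
  simp only [pvScoreB, PySem.List.sum_map_const_int, ← List.countP_eq_length_filter]
  have h1 : keywords.countP (fun k => PySem.Str.isIn k (PySem.Str.lower url)) ≤ keywords.length :=
    List.countP_le_length
  split <;> constructor <;> omega

-- ===== VERDICT (by name: the statement is the Claim_ definition above) =====
theorem rank_urls_spec : Claim_equal_rank_urls := by
  intro urls article_text _
  unfold Spec_rank_urls rank_urls rank_urls_alt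
  simp only []
  set kws : PySem.Set String :=
    PySem.Set.ofList (PySem.List.slice (PySem.Str.split₀ (PySem.Str.lower article_text)) none (some 50)) with hkws
  have hlen : kws.length ≤ 50 := by
    rw [hkws]
    calc (PySem.Set.ofList _).length
        ≤ (PySem.List.slice (PySem.Str.split₀ (PySem.Str.lower article_text)) none (some 50)).length :=
          PySem.Set.length_ofList_le _
      _ ≤ 50 := by
          rw [PySem.List.slice_to _ (by norm_num)]
          simp
  rw [PySem.List.foldl_append_singleton_eq_map]
  simp only [List.nil_append]
  have hmap : urls.map (fun url =>
      (url,
       let url_lower := PySem.Str.lower url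
       let score : Int := kws.foldl (fun s k => if PySem.Str.isIn k url_lower then s + 1 else s) 0
       if (["blog", "article", "post"]).any (fun x => PySem.Str.isIn x url_lower) then score + 3 else score))
      = urls.map (fun u => (u, pvScoreB kws u)) := by
    apply List.map_congr_left
    intro u _
    simp only [Prod.mk.injEq, true_and]
    exact pv_score_eq kws u
  rw [hmap]
  set scored := urls.map (fun u => (u, pvScoreB kws u)) with hscored
  have hb : ∀ p ∈ scored, 0 ≤ p.2 ∧ p.2 < 54 := by
    intro p hp
    rcases List.mem_map.mp hp with ⟨u, _, rfl⟩
    exact pv_score_bounds kws hlen u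
  rw [pv_sorted_eq_buckets scored hb, pv_buckets_char scored hb,
      PySem.List.foldl_append_eq_flatten, List.nil_append, ← List.map_reverse,
      pv_flatMap_map_fst, List.flatMap_def]
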